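-- pv_equiv track=rewrite | github.com/yati-sagade/brilhack | brilhack/global_analysis.py | postorder_blocks
-- ===== SOURCE A (Python) =====
-- from typing import List, Set, Dict, Tuple
--
-- def postorder_blocks(cfg: List[List[int]]) -> List[int]:
--     """Returns a post-ordering of `cfg`'s indices."""
--     visited = set()
--     acc = []
--
--     def _dfs(idx):
--         if idx not in visited:
--             visited.add(idx)
--             for succ in cfg[idx]:
--                 _dfs(succ)
--             acc.append(idx)
--
--     for i in range(len(cfg)):
--         _dfs(i)
--
--     return acc
-- ===== SOURCE B (Python) =====
-- def postorder_blocks(cfg):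
--     """Returns a post-ordering of `cfg`'s indices (iterative DFS, explicit stack)."""
--     visited = set()
--     acc = []
--     stack = [(i, False) for i in reversed(range(len(cfg)))]
--     while stack:
--         node, processed = stack.pop()
--         if processed:
--             acc.append(node)
--             continue
--         if node in visited:
--             continue
--         succs = cfg[node]
--         visited.add(node)
--         stack.append((node, True))
--         for succ in reversed(succs):
--             stack.append((succ, False))
--     return acc
-- ===== Notes on version B (the rewrite author's own statement) =====
-- stated objective: alternative
-- what changed: Replaced the recursive DFS (nested _dfs closure mutating visited/acc) by an iterative DFS over one explicit stack of (node, processed) pairs, pushing successors reversed and deferring the post-order append to a processed marker.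
import Mathlib
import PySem

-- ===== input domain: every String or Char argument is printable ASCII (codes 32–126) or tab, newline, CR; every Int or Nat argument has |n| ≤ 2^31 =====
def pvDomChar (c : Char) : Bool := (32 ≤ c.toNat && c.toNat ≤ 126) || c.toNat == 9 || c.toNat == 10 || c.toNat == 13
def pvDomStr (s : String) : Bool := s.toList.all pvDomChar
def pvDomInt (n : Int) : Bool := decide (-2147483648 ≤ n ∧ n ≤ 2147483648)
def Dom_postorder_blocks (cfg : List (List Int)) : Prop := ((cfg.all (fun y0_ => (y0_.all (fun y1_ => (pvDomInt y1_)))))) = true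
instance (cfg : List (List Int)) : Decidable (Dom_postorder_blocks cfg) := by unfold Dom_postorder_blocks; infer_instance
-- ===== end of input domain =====

-- B replaces A's recursive DFS by an iterative DFS with an explicit stack of (node, processed)
-- pairs (alternative decomposition, same asymptotic cost).

-- ===== PORT A =====
-- A's `_dfs` closure with its (visited, acc) state threaded explicitly; the recursion is made
-- structural by a fuel argument that is provably invisible: a chain of productive nested calls adds
-- a distinct member of [-len cfg, len cfg) to visited at every level, so 2*len(cfg)+1 never runs out.
-- Where Python raises IndexError (cfg[idx] with pyGet? = none) the port skips; outside Pre_.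
def dfsA (cfg : List (List Int)) : Nat → Int → PySem.Set Int × List Int → PySem.Set Int × List Int
  | 0, _, st => st
  | fuel+1, idx, st =>
    if PySem.Set.contains st.1 idx then st
    else
      match PySem.List.pyGet? cfg idx with
      | none => st
      | some succs =>
        let st' := succs.foldl (fun st s => dfsA cfg fuel s st) (PySem.Set.add st.1 idx, st.2)
        (st'.1, st'.2 ++ [idx])

def postorder_blocks (cfg : List (List Int)) : List Int :=
  ((PySem.List.pyRange 0 (PySem.List.len cfg) 1).foldl
    (fun st i => dfsA cfg (2 * cfg.length + 1) i st) (PySem.Set.empty, [])).2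

-- ===== PORT B =====
-- number of integers of [-len cfg, len cfg) not yet visited: the loop's termination measure
def unvB (cfg : List (List Int)) (vis : PySem.Set Int) : Nat :=
  ((List.range (2 * cfg.length)).map (fun (k : Nat) => (k : Int) - (cfg.length : Int))).countP
    (fun x => !(PySem.Set.contains vis x))

lemma pvCountP_lt_of_witness {α : Type} (l : List α) (p q : α → Bool)
    (h : ∀ x ∈ l, p x = true → q x = true) (x : α) (hx : x ∈ l)
    (hq : q x = true) (hp : p x = false) : l.countP p < l.countP q := by
  induction l with
  | nil => cases hx
  | cons a tl ih =>
    rcases List.mem_cons.mp hx with rfl | hxtl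
    · have hmono : tl.countP p ≤ tl.countP q :=
        List.countP_mono_left (fun y hy => h y (List.mem_cons_of_mem _ hy))
      simp [hp, hq]; omega
    · have := ih (fun y hy => h y (List.mem_cons_of_mem _ hy)) hxtl
      by_cases hpa : p a = true
      · have hqa := h a (List.mem_cons_self) hpa
        simp [hpa, hqa]; omega
      · simp only [Bool.not_eq_true] at hpa
        simp [List.countP_cons, hpa]
        rcases hqa : q a <;> simp <;> omega

lemma pvContains_mono (vis : PySem.Set Int) (x y : Int)
    (hy : PySem.Set.contains vis y = true) :
    PySem.Set.contains (PySem.Set.add vis x) y = true :=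
  (PySem.Set.contains_iff _ _).mpr
    ((PySem.Set.mem_add _ _ _).mpr (Or.inl ((PySem.Set.contains_iff _ _).mp hy)))

lemma unvB_add_lt (cfg : List (List Int)) (vis : PySem.Set Int) (x : Int)
    (hx : x ∉ vis)
    (h1 : -(cfg.length : Int) ≤ x) (h2 : x < (cfg.length : Int)) :
    unvB cfg (PySem.Set.add vis x) < unvB cfg vis := by
  unfold unvB
  apply pvCountP_lt_of_witness _ _ _ ?mono x ?mem ?q ?p
  case mono =>
    intro y _ h
    simp only [Bool.not_eq_true'] at h ⊢
    cases hcv : PySem.Set.contains vis y with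
    | false => rfl
    | true => rw [pvContains_mono vis x y hcv] at h; cases h
  case mem =>
    refine List.mem_map.mpr ⟨(x + cfg.length).toNat, List.mem_range.mpr ?_, ?_⟩
    · omega
    · omega
  case q =>
    simpa using hx
  case p =>
    simp

-- B's while-loop; the Lean list's HEAD is the TOP of Python's stack, so Python's
-- `for succ in reversed(succs): stack.append(...)` is the foldl of cons over succs.reverse below.
-- Where Python raises IndexError (pyGet? = none) the port skips; outside Pre_.
def loopB (cfg : List (List Int)) :
    List (Int × Bool) → PySem.Set Int → List Int → List Int
  | [], _, acc => acc
  | (node, true) :: rest, vis, acc => loopB cfg rest vis (acc ++ [node])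
  | (node, false) :: rest, vis, acc =>
    if PySem.Set.contains vis node then loopB cfg rest vis acc
    else
      match h : PySem.List.pyGet? cfg node with
      | none => loopB cfg rest vis acc
      | some succs =>
        loopB cfg (succs.reverse.foldl (fun st s => (s, false) :: st) ((node, true) :: rest))
          (PySem.Set.add vis node) acc
  termination_by stack vis _ => (unvB cfg vis, stack.length)
  decreasing_by
    · exact Prod.Lex.right _ (by simp)
    · exact Prod.Lex.right _ (by simp)
    · exact Prod.Lex.right _ (by simp)
    · apply Prod.Lex.left
      have hin : PySem.Raise.InRange cfg.length node := by
        by_contra hc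
        rw [← PySem.List.pyGet?_eq_none_iff] at hc
        rw [h] at hc; cases hc
      obtain ⟨h1, h2⟩ := hin
      have hx : node ∉ vis := fun hm =>
        ‹¬ PySem.Set.contains vis node = true› ((PySem.Set.contains_iff _ _).mpr hm)
      exact unvB_add_lt cfg vis node hx h1 h2

def postorder_blocks_alt (cfg : List (List Int)) : List Int :=
  loopB cfg ((PySem.List.pyRange 0 (PySem.List.len cfg) 1).map (fun i => (i, false)))
    PySem.Set.empty []

-- ===== PRECONDITION & SPEC =====
-- Pre_ excludes exactly the inputs where Python A raises IndexError: some successor in cfg is not a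
-- valid Python index of cfg (every row of cfg is iterated by A's outer loop, so every such
-- successor is reached).
def Pre_postorder_blocks (cfg : List (List Int)) : Prop :=
  ∀ row ∈ cfg, ∀ s ∈ row, -(cfg.length : Int) ≤ s ∧ s < (cfg.length : Int)
instance (cfg : List (List Int)) : Decidable (Pre_postorder_blocks cfg) := by
  unfold Pre_postorder_blocks; infer_instance
def pvWitness_postorder_blocks : List (List Int) := [[1, 2], [2], [0, -1]]

def Spec_postorder_blocks (cfg : List (List Int)) (out : List Int) : Prop := out = postorder_blocks_alt cfg
instance (cfg : List (List Int)) (out : List Int) : Decidable (Spec_postorder_blocks cfg out) := by unfold Spec_postorder_blocks; infer_instance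

-- ===== CLAIM (what is proved, stated in full; the proofs are below) =====
def Claim_equal_postorder_blocks : Prop := ∀ (cfg : List (List Int)), Dom_postorder_blocks cfg → Pre_postorder_blocks cfg → Spec_postorder_blocks cfg (postorder_blocks cfg)

-- ===== LEMMAS AND PROOFS =====

lemma unvB_le (cfg : List (List Int)) (vis : PySem.Set Int) : unvB cfg vis ≤ 2 * cfg.length := by
  calc unvB cfg vis ≤ ((List.range (2 * cfg.length)).map (fun (k : Nat) => (k : Int) - (cfg.length : Int))).length :=
        List.countP_le_length
    _ = 2 * cfg.length := by simp

lemma unvB_add_le (cfg : List (List Int)) (vis : PySem.Set Int) (x : Int) :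
    unvB cfg (PySem.Set.add vis x) ≤ unvB cfg vis := by
  unfold unvB
  apply List.countP_mono_left
  intro y _ h
  simp only [Bool.not_eq_true'] at h ⊢

  cases hcv : PySem.Set.contains vis y with
  | false => rfl
  | true => rw [pvContains_mono vis x y hcv] at h; cases h

lemma pvLoopB_true (cfg : List (List Int)) (n : Int) (rest : List (Int × Bool))
    (vis : PySem.Set Int) (acc : List Int) :
    loopB cfg ((n, true) :: rest) vis acc = loopB cfg rest vis (acc ++ [n]) := by
  rw [loopB.eq_def]

-- visited only grows through dfsA, so the measure never increases
lemma dfsA_unvB_le (cfg : List (List Int)) :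
    ∀ (fuel : Nat) (idx : Int) (st : PySem.Set Int × List Int),
      unvB cfg (dfsA cfg fuel idx st).1 ≤ unvB cfg st.1 := by
  intro fuel
  induction fuel with
  | zero => intro idx st; simp [dfsA]
  | succ f ih =>
    intro idx st
    rw [dfsA]
    by_cases hc : PySem.Set.contains st.1 idx
    · simp [show idx ∈ st.1 from (PySem.Set.contains_iff _ _).mp hc]
    · simp only [hc, if_false, Bool.false_eq_true]
      cases hget : PySem.List.pyGet? cfg idx with
      | none => simp
      | some succs =>
        simp only
        have hfold : ∀ (l : List Int) (st0 : PySem.Set Int × List Int),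
            unvB cfg ((l.foldl (fun st s => dfsA cfg f s st) st0)).1 ≤ unvB cfg st0.1 := by
          intro l
          induction l with
          | nil => intro st0; simp
          | cons s tl ihl =>
            intro st0
            simp only [List.foldl_cons]
            exact le_trans (ihl _) (ih s st0)
        exact le_trans (hfold succs _) (unvB_add_le cfg st.1 idx)

-- the Python push loop, in the head-is-top representation
lemma pushRev (succs : List Int) (st : List (Int × Bool)) :
    succs.reverse.foldl (fun st s => (s, false) :: st) st
      = succs.map (fun s => (s, false)) ++ st := by
  induction succs generalizing st with
  | nil => rfl
  | cons a tl ih =>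
    simp only [List.reverse_cons, List.foldl_append, List.foldl_cons, List.foldl_nil, List.map_cons]
    rw [ih]
    simp

-- main simulation: one (idx, False) stack entry behaves like one _dfs call
lemma simA (cfg : List (List Int)) :
    ∀ (fuel : Nat) (idx : Int) (vis : PySem.Set Int) (acc : List Int) (rest : List (Int × Bool)),
      unvB cfg vis < fuel →
      loopB cfg ((idx, false) :: rest) vis acc
        = loopB cfg rest (dfsA cfg fuel idx (vis, acc)).1 (dfsA cfg fuel idx (vis, acc)).2 := by
  intro fuel
  induction fuel with
  | zero => intro _ _ _ _ h; omega
  | succ f ih =>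
    intro idx vis acc rest hlt
    rw [loopB, dfsA]
    by_cases hc : PySem.Set.contains vis idx
    · simp [show idx ∈ vis from (PySem.Set.contains_iff _ _).mp hc]
    · simp only [hc, if_false, Bool.false_eq_true]
      cases hget : PySem.List.pyGet? cfg idx with
      | none => simp
      | some succs =>
        simp only
        rw [pushRev]
        have hin : PySem.Raise.InRange cfg.length idx := by
          by_contra hcc
          rw [← PySem.List.pyGet?_eq_none_iff] at hcc
          rw [hget] at hcc; cases hcc
        have hdec : unvB cfg (PySem.Set.add vis idx) < f := by
          have hx : idx ∉ vis := fun hm => hc ((PySem.Set.contains_iff _ _).mpr hm)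
          have := unvB_add_lt cfg vis idx hx hin.1 hin.2
          omega
        -- fold over the successors, driven by the fuel-f induction hypothesis
        have hsim : ∀ (l : List Int) (v : PySem.Set Int) (a : List Int) (r : List (Int × Bool)),
            unvB cfg v < f →
            loopB cfg (l.map (fun s => (s, false)) ++ r) v a
              = loopB cfg r ((l.foldl (fun st s => dfsA cfg f s st) (v, a))).1
                  ((l.foldl (fun st s => dfsA cfg f s st) (v, a))).2 := by
          intro l
          induction l with
          | nil => intro v a r _; simp
          | cons s tl ihl =>
            intro v a r hv
            simp only [List.map_cons, List.cons_append, List.foldl_cons]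
            rw [ih s v a (tl.map (fun s => (s, false)) ++ r) hv]
            have hle : unvB cfg (dfsA cfg f s (v, a)).1 ≤ unvB cfg v :=
              dfsA_unvB_le cfg f s (v, a)
            exact ihl _ _ _ (by omega)
        rw [hsim succs (PySem.Set.add vis idx) acc ((idx, true) :: rest) hdec]
        rw [pvLoopB_true]

-- the outer loop: the initial stack of all indices vs the foldl of _dfs over range(len(cfg))
lemma simTop (cfg : List (List Int)) :
    ∀ (l : List Int) (vis : PySem.Set Int) (acc : List Int),
      loopB cfg (l.map (fun i => (i, false))) vis acc
        = ((l.foldl (fun st i => dfsA cfg (2 * cfg.length + 1) i st) (vis, acc))).2 := by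
  intro l
  induction l with
  | nil => intro vis acc; simp only [List.map_nil]; rw [loopB]; simp
  | cons i tl ih =>
    intro vis acc
    simp only [List.map_cons, List.foldl_cons]
    have hfuel : unvB cfg vis < 2 * cfg.length + 1 := by
      have := unvB_le cfg vis; omega
    rw [simA cfg (2 * cfg.length + 1) i vis acc (tl.map (fun i => (i, false))) hfuel]
    exact ih _ _

-- ===== VERDICT (by name: the statement is the Claim_ definition above) =====
theorem postorder_blocks_spec : Claim_equal_postorder_blocks := by
  intro cfg _ _
  unfold Spec_postorder_blocks postorder_blocks postorder_blocks_alt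
  rw [simTop]
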